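-- pv_equiv track=rewrite | github.com/bhayru01/Portfolio | Strings.py | last_part
-- ===== SOURCE A (Python) =====
-- def last_part(string):
--     specified = "-"
--     location = 0
--     for i in range(len(string)):
--         if specified == string[i]:
--             location = i
--     newString = string[:location]
--     return newString
-- ===== SOURCE B (Python) =====
-- def last_part(string):
--     return "-".join(string.split("-")[:-1])
-- ===== Notes on version B (the rewrite author's own statement) =====
-- stated objective: idiomatic
-- what changed: Replaces the manual index-tracking character scan and slice with a split-on-hyphen / drop-last-segment / rejoin pipeline with no index arithmetic.
import Mathlib
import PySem

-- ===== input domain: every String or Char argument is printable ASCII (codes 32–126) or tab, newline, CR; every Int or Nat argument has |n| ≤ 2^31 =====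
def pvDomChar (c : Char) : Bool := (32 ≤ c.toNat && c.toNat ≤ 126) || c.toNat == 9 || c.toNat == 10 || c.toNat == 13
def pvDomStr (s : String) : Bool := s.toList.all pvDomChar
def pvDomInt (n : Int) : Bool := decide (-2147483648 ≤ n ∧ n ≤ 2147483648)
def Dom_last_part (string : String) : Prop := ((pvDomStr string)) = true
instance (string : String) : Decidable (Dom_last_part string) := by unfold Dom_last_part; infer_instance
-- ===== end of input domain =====

-- B replaces A's manual last-hyphen index scan and slice by the idiomatic split / drop-last-segment / rejoin pipeline; same O(n), measurably faster (C-level str methods vs a per-character Python loop).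


-- ===== PORT A =====
def last_part (string : String) : String :=
  let specified : Char := '-'   -- Python compares the one-char string "-" with string[i]; on chars this is exact
  let location : Int :=
    (PySem.List.pyRange 0 (PySem.Str.len string) 1).foldl
      (fun loc i => if PySem.Str.pyGet? string i == some specified then i else loc) 0
  PySem.Str.slice string none (some location)

-- ===== PORT B =====
def last_part_alt (string : String) : String :=
  PySem.Str.join "-"
    (PySem.List.slice ((PySem.Str.split? string "-").getD []) none (some (-1)))

-- ===== PRECONDITION & SPEC =====
def Spec_last_part (string : String) (out : String) : Prop := out = last_part_alt string
instance (string : String) (out : String) : Decidable (Spec_last_part string out) := by unfold Spec_last_part; infer_instance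

-- ===== CLAIM (what is proved, stated in full; the proofs are below) =====
def Claim_equal_last_part : Prop := ∀ (string : String), Dom_last_part string → Spec_last_part string (last_part string)

-- ===== LEMMAS AND PROOFS =====

-- common specification: everything before the last '-' (empty if there is none)
def gfun : List Char → List Char
  | [] => []
  | c :: rest => if '-' ∈ rest then c :: gfun rest else []

theorem foldl_const {P : Nat → Bool} {f : Nat → Nat → Nat} :
    ∀ (l : List Nat) (a : Nat), (∀ k ∈ l, P k = false) →
      l.foldl (fun loc k => if P k then f loc k else loc) a = a := by
  intro l
  induction l with
  | nil => intro a _; rfl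
  | cons x xs ih =>
    intro a h
    have hx : P x = false := h x List.mem_cons_self
    simp only [List.foldl_cons, hx, Bool.false_eq_true, if_false]
    exact ih a (fun k hk => h k (List.mem_cons_of_mem _ hk))

theorem foldl_init_irrel {P : Nat → Bool} {f : Nat → Nat} :
    ∀ (l : List Nat) (a b : Nat), (∃ k ∈ l, P k = true) →
      l.foldl (fun loc k => if P k then f k else loc) a
        = l.foldl (fun loc k => if P k then f k else loc) b := by
  intro l
  induction l with
  | nil => intro a b h; simp at h
  | cons x xs ih =>
    intro a b h
    by_cases hx : P x = true
    · simp [List.foldl_cons, hx]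
    · have hx' : P x = false := by simpa using hx
      obtain ⟨k, hk, hPk⟩ := h
      rcases List.mem_cons.mp hk with rfl | hk'
      · rw [hPk] at hx'; cases hx'
      · simp only [List.foldl_cons, hx', Bool.false_eq_true, if_false]
        exact ih a b ⟨k, hk', hPk⟩

theorem foldl_shift {P : Nat → Bool} :
    ∀ (l : List Nat) (a : Nat),
      l.foldl (fun loc k => if P k then k + 1 else loc) (a + 1)
        = l.foldl (fun loc k => if P k then k else loc) a + 1 := by
  intro l
  induction l with
  | nil => intro a; rfl
  | cons x xs ih =>
    intro a
    by_cases hx : P x = true <;> simp [List.foldl_cons, hx, ih]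

def nloc (cs : List Char) : Nat :=
  (List.range cs.length).foldl (fun loc k => if cs[k]? = some '-' then k else loc) 0

theorem nloc_cons (c : Char) (cs : List Char) :
    nloc (c :: cs) = if '-' ∈ cs then nloc cs + 1 else 0 := by
  unfold nloc
  rw [show (c :: cs).length = cs.length + 1 from rfl, List.range_succ_eq_map]
  simp only [List.foldl_cons, List.foldl_map, List.getElem?_cons_succ, List.getElem?_cons_zero]
  simp only [ite_self, Nat.succ_eq_add_one]
  by_cases hm : '-' ∈ cs
  · rw [if_pos hm]
    obtain ⟨k, hk⟩ := List.mem_iff_getElem?.mp hm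
    have hkn : k < cs.length := (List.getElem?_eq_some_iff.mp hk).1
    have hex : ∃ j ∈ List.range cs.length, (decide (cs[j]? = some '-')) = true := by
      exact ⟨k, List.mem_range.mpr hkn, by simp [hk]⟩
    calc (List.range cs.length).foldl (fun loc k => if cs[k]? = some '-' then k + 1 else loc) 0
        = (List.range cs.length).foldl (fun loc k => if cs[k]? = some '-' then k + 1 else loc) (0 + 1) := by
          have := foldl_init_irrel (P := fun j => decide (cs[j]? = some '-')) (f := fun k => k + 1)
            (List.range cs.length) 0 1 hex
          simpa using this
      _ = (List.range cs.length).foldl (fun loc k => if cs[k]? = some '-' then k else loc) 0 + 1 := by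
          have := foldl_shift (P := fun j => decide (cs[j]? = some '-')) (List.range cs.length) 0
          simpa using this
  · rw [if_neg hm]
    have := foldl_const (P := fun j => decide (cs[j]? = some '-')) (f := fun loc k => k + 1)
      (List.range cs.length) 0 (by
        intro k hk
        simp only [decide_eq_false_iff_not]
        intro hc
        exact hm (List.mem_of_getElem? hc))
    simpa using this

theorem take_nloc (cs : List Char) : cs.take (nloc cs) = gfun cs := by
  induction cs with
  | nil => rfl
  | cons c rest ih =>
    rw [nloc_cons, gfun]
    by_cases hm : '-' ∈ rest
    · rw [if_pos hm, if_pos hm, List.take_succ_cons, ih]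
    · rw [if_neg hm, if_neg hm, List.take_zero]

theorem foldl_int_nat (P : Nat → Bool) :
    ∀ (l : List Nat) (a : Nat),
      l.foldl (fun (loc : Int) k => if P k then (k : Int) else loc) (a : Int)
        = ((l.foldl (fun (loc : Nat) k => if P k then k else loc) a : Nat) : Int) := by
  intro l
  induction l with
  | nil => intro a; rfl
  | cons x xs ih =>
    intro a
    by_cases hx : P x = true <;> simp [List.foldl_cons, hx, ih]


theorem lastA (s : String) : (last_part s).toList = gfun s.toList := by
  unfold last_part
  simp only [PySem.List.pyRange_one]
  have hlen : ((PySem.Str.len s - 0).toNat) = s.toList.length := by simp [PySem.Str.len]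
  rw [hlen, List.foldl_map]
  have hstep : (fun (loc : Int) (k : Nat) =>
      if PySem.Str.pyGet? s ((0 : Int) + k) == some '-' then ((0:Int) + k) else loc)
      = fun (loc : Int) (k : Nat) => if (decide (s.toList[k]? = some '-')) then (k : Int) else loc := by
    funext loc k
    simp
  rw [hstep]
  have := foldl_int_nat (fun k => decide (s.toList[k]? = some '-')) (List.range s.toList.length) 0
  simp only [Nat.cast_zero] at this
  rw [this]
  rw [PySem.Str.toList_slice]
  simp only [PySem.Chars.slice_eq_listSlice]
  rw [PySem.List.slice_to _ (by positivity)]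
  rw [Int.toNat_natCast]
  have h2 := take_nloc s.toList
  unfold nloc at h2
  simpa using h2

def mySplit : List Char → List Char → List (List Char)
  | pre, [] => [pre]
  | pre, c :: rest => if c = '-' then pre :: mySplit [] rest else mySplit (pre ++ [c]) rest

theorem go_spec : ∀ (fuel : Nat) (l : List Char), l.length ≤ fuel → ∀ (cur : List Char) (acc : List (List Char)),
    PySem.Chars.splitOn.go ['-'] fuel l cur acc = acc.reverse ++ mySplit cur.reverse l := by
  intro fuel
  induction fuel with
  | zero =>
    intro l hl cur acc
    have : l = [] := List.length_eq_zero_iff.mp (Nat.le_zero.mp hl)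
    subst this
    simp [PySem.Chars.splitOn.go, mySplit]
  | succ f ih =>
    intro l hl cur acc
    cases l with
    | nil => simp [PySem.Chars.splitOn.go, mySplit]
    | cons c rest =>
      by_cases hc : c = '-'
      · subst hc
        rw [show PySem.Chars.splitOn.go ['-'] (f+1) ('-' :: rest) cur acc
            = PySem.Chars.splitOn.go ['-'] f rest [] (cur.reverse :: acc) from by
          simp [PySem.Chars.splitOn.go, List.isPrefixOf]]
        rw [ih rest (by simpa using Nat.succ_le_succ_iff.mp hl) [] (cur.reverse :: acc)]
        simp [mySplit]
      · rw [show PySem.Chars.splitOn.go ['-'] (f+1) (c :: rest) cur acc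
            = PySem.Chars.splitOn.go ['-'] f rest (c :: cur) acc from by
          simp [PySem.Chars.splitOn.go, List.isPrefixOf, Ne.symm hc]]
        rw [ih rest (by simpa using Nat.succ_le_succ_iff.mp hl) (c :: cur) acc]
        simp [mySplit, hc]

theorem splitOn_eq_mySplit (cs : List Char) :
    PySem.Chars.splitOn cs ['-'] = mySplit [] cs := by
  rw [show PySem.Chars.splitOn cs ['-'] = PySem.Chars.splitOn.go ['-'] (cs.length + 1) cs [] [] from rfl]
  rw [go_spec (cs.length + 1) cs (by omega) [] []]
  simp

theorem mySplit_ne_nil : ∀ (l pre : List Char), mySplit pre l ≠ [] := by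
  intro l
  induction l with
  | nil => intro pre; simp [mySplit]
  | cons c rest ih =>
    intro pre
    by_cases hc : c = '-' <;> simp [mySplit, hc, ih]

theorem mySplit_modifyHead : ∀ (l pre : List Char),
    mySplit pre l = (mySplit [] l).modifyHead (pre ++ ·) := by
  intro l
  induction l with
  | nil => intro pre; simp [mySplit]
  | cons c rest ih =>
    intro pre
    by_cases hc : c = '-'
    · simp [mySplit, hc]
    · rw [mySplit, if_neg hc, ih (pre ++ [c]), mySplit, if_neg hc, List.nil_append, ih [c],
        List.modifyHead_modifyHead]
      congr 1
      funext x
      simp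

theorem mySplit_no_hyphen : ∀ (l pre : List Char), '-' ∉ l → mySplit pre l = [pre ++ l] := by
  intro l
  induction l with
  | nil => intro pre _; simp [mySplit]
  | cons c rest ih =>
    intro pre h
    have hc : c ≠ '-' := fun hh => h (hh ▸ List.mem_cons_self)
    rw [mySplit, if_neg hc, ih (pre ++ [c]) (fun hh => h (List.mem_cons_of_mem _ hh))]
    simp

theorem mySplit_hyphen : ∀ (l : List Char), '-' ∈ l →
    ∃ p ps, mySplit [] l = p :: ps ∧ ps ≠ [] := by
  intro l
  induction l with
  | nil => intro h; simp at h
  | cons c rest ih =>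
    intro h
    by_cases hc : c = '-'
    · subst hc
      refine ⟨[], mySplit [] rest, by simp [mySplit], mySplit_ne_nil rest []⟩
    · have hr : '-' ∈ rest := by
        rcases List.mem_cons.mp h with h1 | h2
        · exact absurd h1.symm hc
        · exact h2
      obtain ⟨p, ps, hps, hne⟩ := ih hr
      refine ⟨c :: p, ps, ?_, hne⟩
      rw [mySplit, if_neg hc, List.nil_append, mySplit_modifyHead rest [c], hps]
      simp

theorem join_cons_head (c : Char) (q : List Char) (qs : List (List Char)) :
    PySem.Chars.join ['-'] ((c :: q) :: qs) = c :: PySem.Chars.join ['-'] (q :: qs) := by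
  cases qs with
  | nil => simp [PySem.Chars.join_singleton]
  | cons r rs => simp [PySem.Chars.join_cons_cons]

theorem hfun_eq_gfun : ∀ (cs : List Char),
    PySem.Chars.join ['-'] ((mySplit [] cs).dropLast) = gfun cs := by
  intro cs
  induction cs with
  | nil => simp [mySplit, PySem.Chars.join_nil, gfun]
  | cons c rest ih =>
    by_cases hm : '-' ∈ rest
    · obtain ⟨p, ps, hps, hne⟩ := mySplit_hyphen rest hm
      by_cases hc : c = '-'
      · subst hc
        rw [show mySplit [] ('-' :: rest) = [] :: mySplit [] rest from by simp [mySplit]]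
        rw [List.dropLast_cons_of_ne_nil (mySplit_ne_nil rest [])]
        rw [gfun, if_pos hm, ← ih, hps, List.dropLast_cons_of_ne_nil hne]
        cases ps with
        | nil => exact absurd rfl hne
        | cons r rs =>
          cases hrs : (r :: rs).dropLast with
          | nil => simp [PySem.Chars.join_cons_cons, PySem.Chars.join_singleton]
          | cons u us => simp [PySem.Chars.join_cons_cons]
      · rw [mySplit, if_neg hc, List.nil_append, mySplit_modifyHead rest [c], hps]
        simp only [List.modifyHead_cons, List.singleton_append]
        rw [List.dropLast_cons_of_ne_nil hne, join_cons_head, gfun, if_pos hm, ← ih, hps,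
          List.dropLast_cons_of_ne_nil hne]
    · by_cases hc : c = '-'
      · subst hc
        rw [show mySplit [] ('-' :: rest) = [] :: mySplit [] rest from by simp [mySplit],
          mySplit_no_hyphen rest [] hm]
        simp [gfun, hm, PySem.Chars.join_singleton]
      · rw [mySplit, if_neg hc, List.nil_append, mySplit_no_hyphen rest [c] hm]
        simp [gfun, hm, PySem.Chars.join_nil]


theorem lastB (s : String) : (last_part_alt s).toList = gfun s.toList := by
  unfold last_part_alt
  have hs : PySem.Str.split? s "-" = some (List.map String.ofList (mySplit [] s.toList)) := by
    rw [show PySem.Str.split? s "-"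
        = Option.map (List.map String.ofList) (PySem.Chars.split? s.toList "-".toList) from rfl]
    rw [show ("-" : String).toList = ['-'] from rfl]
    rw [show PySem.Chars.split? s.toList ['-'] = some (PySem.Chars.splitOn s.toList ['-']) from by
      simp [PySem.Chars.split?]]
    rw [splitOn_eq_mySplit]
    rfl
  rw [hs]
  simp only [Option.getD_some, PySem.List.slice_to_neg_one]
  rw [show PySem.Str.join "-" ((List.map String.ofList (mySplit [] s.toList)).dropLast)
      = String.ofList (PySem.Chars.join "-".toList
          (List.map String.toList ((List.map String.ofList (mySplit [] s.toList)).dropLast))) from rfl]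
  rw [← List.map_dropLast, List.map_map]
  have hid : (String.toList ∘ String.ofList) = id := by funext l; simp
  rw [hid, List.map_id, show ("-" : String).toList = ['-'] from rfl]
  simp [hfun_eq_gfun]

-- ===== VERDICT (by name: the statement is the Claim_ definition above) =====
theorem last_part_spec : Claim_equal_last_part := by
  intro s _
  unfold Spec_last_part
  have h : (last_part s).toList = (last_part_alt s).toList := by rw [lastA, lastB]
  exact String.toList_inj.mp h
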